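-- pv_equiv track=rewrite | github.com/lucferreira-27/SonioxSRT | python/sonioxsrt/subtitles.py | _find_split_index
-- ===== SOURCE A (Python) =====
-- from typing import Iterable, List, Optional, Sequence, Tuple, Union
--
-- SENTENCE_ENDERS = {"。", ".", "！", "!", "？", "?"}
--
-- MINOR_BREAKERS = {",", ";", ":", "、", "—", "–", "-"}
--
-- def _find_split_index(tokens: Sequence[dict]) -> int:
--     n = len(tokens)
--     if n <= 1:
--         return 1
--     mid_chars = sum(len(t.get("text", "")) for t in tokens) // 2
--
--     cum = []
--     acc = 0
--     safe_after = []
--     for i, tok in enumerate(tokens):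
--         txt = tok.get("text", "")
--         acc += len(txt)
--         cum.append(acc)
--         if i < n - 1:
--             nxt = tokens[i + 1].get("text", "")
--             if nxt.startswith(" ") or (
--                 txt
--                 and (
--                     txt.endswith(" ")
--                     or txt[-1] in SENTENCE_ENDERS
--                     or txt[-1] in MINOR_BREAKERS
--                 )
--             ):
--                 safe_after.append(i + 1)
--
--     def _is_safe_at(k: int) -> bool:
--         if k <= 0 or k >= n:
--             return True
--         left = tokens[k - 1].get("text", "")
--         right = tokens[k].get("text", "")
--         return right.startswith(" ") or (
--             left.endswith(" ")
--             or (
--                 left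
--                 and (left[-1] in SENTENCE_ENDERS or left[-1] in MINOR_BREAKERS)
--             )
--         )
--
--     def _adjust_to_safe(k: int) -> int:
--         if _is_safe_at(k):
--             return k
--         for j in range(k + 1, n):
--             if _is_safe_at(j):
--                 return j
--         for j in range(k - 1, 0, -1):
--             if _is_safe_at(j):
--                 return j
--         return k
--
--     if safe_after:
--         best = min(safe_after, key=lambda k: abs(cum[k - 1] - mid_chars))
--         return _adjust_to_safe(best)
--
--     mid_tok = n // 2
--     for i in range(mid_tok, 0, -1):
--         t = tokens[i - 1].get("text", "")
--         if t and t[-1] in SENTENCE_ENDERS: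
--             return _adjust_to_safe(i)
--     for i in range(mid_tok + 1, n):
--         t = tokens[i - 1].get("text", "")
--         if t and t[-1] in SENTENCE_ENDERS:
--             return _adjust_to_safe(i)
--
--     return _adjust_to_safe(mid_tok)
-- ===== SOURCE B (Python) =====
-- SENTENCE_ENDERS = {"。", ".", "！", "!", "？", "?"}
-- MINOR_BREAKERS = {",", ";", ":", "、", "—", "–", "-"}
--
--
-- def _boundary_ok(left: str, right: str) -> bool:
--     return right.startswith(" ") or (
--         left.endswith(" ")
--         or (left and (left[-1] in SENTENCE_ENDERS or left[-1] in MINOR_BREAKERS))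
--     )
--
--
-- def _find_split_index(tokens) -> int:
--     n = len(tokens)
--     if n <= 1:
--         return 1
--     texts = [t.get("text", "") for t in tokens]
--     cum = []
--     acc = 0
--     for s in texts:
--         acc += len(s)
--         cum.append(acc)
--     mid = cum[-1] // 2
--
--     def _is_safe_at(k):
--         return k <= 0 or k >= n or _boundary_ok(texts[k - 1], texts[k])
--
--     def _adjust_to_safe(k):
--         if _is_safe_at(k):
--             return k
--         for j in range(k + 1, n):
--             if _is_safe_at(j):
--                 return j
--         for j in range(k - 1, 0, -1):
--             if _is_safe_at(j):
--                 return j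
--         return k
--
--     cands = [(k, cum[k - 1]) for k in range(1, n) if _boundary_ok(texts[k - 1], texts[k])]
--     if cands:
--         # cum is nondecreasing, so the candidate closest to mid is either the
--         # earliest candidate attaining the largest cumulative count <= mid, or the
--         # first candidate whose count exceeds mid; ties go to the left one.
--         left = [kc for kc in cands if kc[1] <= mid]
--         if not left:
--             best = cands[0][0]
--         else:
--             cmax = left[-1][1]
--             p = next(kc for kc in left if kc[1] == cmax)
--             q = next((kc for kc in cands if kc[1] > mid), None)
--             if q is None or mid - p[1] <= q[1] - mid:
--                 best = p[0]
--             else: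
--                 best = q[0]
--         return _adjust_to_safe(best)
--
--     mid_tok = n // 2
--     for i in range(mid_tok, 0, -1):
--         t = texts[i - 1]
--         if t and t[-1] in SENTENCE_ENDERS:
--             return _adjust_to_safe(i)
--     for i in range(mid_tok + 1, n):
--         t = texts[i - 1]
--         if t and t[-1] in SENTENCE_ENDERS:
--             return _adjust_to_safe(i)
--     return _adjust_to_safe(mid_tok)
-- ===== Notes on version B (the rewrite author's own statement) =====
-- stated objective: alternative
-- what changed: Instead of A's argmin scan (build cum and safe_after lists, then min over all safe boundaries by |cum-mid|), B exploits that the cumulative counts are nondecreasing: it builds the (boundary, count) candidate list once and picks between just two candidates - the earliest one attaining the largest count <= mid and the first one whose count exceeds mid - with ties going to the left, which provably equals the first minimum.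
import Mathlib
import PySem

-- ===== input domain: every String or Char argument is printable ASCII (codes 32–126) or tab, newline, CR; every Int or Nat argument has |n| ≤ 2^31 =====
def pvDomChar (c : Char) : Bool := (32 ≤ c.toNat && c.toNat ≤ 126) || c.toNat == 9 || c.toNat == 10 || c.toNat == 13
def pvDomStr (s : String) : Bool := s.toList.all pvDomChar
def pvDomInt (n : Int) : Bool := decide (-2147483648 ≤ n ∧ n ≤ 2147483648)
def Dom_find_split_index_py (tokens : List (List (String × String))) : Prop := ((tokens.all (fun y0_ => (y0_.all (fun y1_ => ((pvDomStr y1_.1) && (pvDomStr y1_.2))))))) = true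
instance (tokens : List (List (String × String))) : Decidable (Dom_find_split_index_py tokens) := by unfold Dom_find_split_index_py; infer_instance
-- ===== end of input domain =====

-- B replaces A's argmin scan (min over safe_after with key |cum-mid|) by a two-sided selection
-- that exploits monotonicity of the cumulative counts: the best boundary is either the earliest
-- candidate attaining the largest count ≤ mid or the first candidate beyond mid (objective: alternative).

-- ===== PORT A =====
-- tok.get("text", "") : first-match lookup in the association list
def pyDictGetText (tok : List (String × String)) : String :=
  match tok.find? (fun p => p.1 == "text") with
  | some p => p.2
  | none => ""

def isEnder (c : Char) : Bool := c = '。' || c = '.' || c = '！' || c = '!' || c = '？' || c = '?'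
def isMinor (c : Char) : Bool := c = ',' || c = ';' || c = ':' || c = '、' || c = '—' || c = '–' || c = '-'

-- txt[-1] in SENTENCE_ENDERS or txt[-1] in MINOR_BREAKERS (txt nonempty at all call sites)
def lastEnderOrMinor (s : String) : Bool :=
  match s.toList.getLast? with
  | some c => isEnder c || isMinor c
  | none => false

-- the condition of A's safe_after-building loop
def condA (txt nxt : String) : Bool :=
  PySem.Str.startswith nxt " " ||
    (txt != "" && (PySem.Str.endswith txt " " || lastEnderOrMinor txt))

-- A's _is_safe_at over the token list (out-of-range getD never hit: 0 < k < n)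
def isSafeA (tokens : List (List (String × String))) (n k : Int) : Bool :=
  if k ≤ 0 || n ≤ k then true
  else
    let left := pyDictGetText ((PySem.List.pyGet? tokens (k - 1)).getD [])
    let right := pyDictGetText ((PySem.List.pyGet? tokens k).getD [])
    PySem.Str.startswith right " " ||
      (PySem.Str.endswith left " " || (left != "" && lastEnderOrMinor left))

-- A's _adjust_to_safe: the two early-return loops become find? over the same ranges
def adjustA (tokens : List (List (String × String))) (n k : Int) : Int :=
  if isSafeA tokens n k then k
  else
    match (PySem.List.pyRange (k + 1) n 1).find? (fun j => isSafeA tokens n j) with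
    | some j => j
    | none =>
      match (PySem.List.pyRange (k - 1) 0 (-1)).find? (fun j => isSafeA tokens n j) with
      | some j => j
      | none => k

def lastIsEnderTxt (t : String) : Bool :=
  t != "" && (match t.toList.getLast? with | some c => isEnder c | none => false)

def find_split_index_py (tokens : List (List (String × String))) : Int :=
  let n : Int := tokens.length
  if tokens.length ≤ 1 then 1
  else
    let mid := PySem.Int.floordiv (tokens.foldl (fun s t => s + ((pyDictGetText t).length : Int)) 0) 2
    -- the enumerate loop: i runs over 0..n-1, tok = tokens[i]
    let st := (List.range tokens.length).foldl
      (fun (st : Int × List Int × List Int) (i : Nat) =>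
        let txt := pyDictGetText ((PySem.List.pyGet? tokens (i : Int)).getD [])
        let acc := st.1 + (txt.length : Int)
        let cum := st.2.1 ++ [acc]
        let safe :=
          if (i : Int) < n - 1 then
            let nxt := pyDictGetText ((PySem.List.pyGet? tokens ((i : Int) + 1)).getD [])
            if condA txt nxt then st.2.2 ++ [(i : Int) + 1] else st.2.2
          else st.2.2
        (acc, cum, safe))
      (0, [], [])
    match PySem.List.min? st.2.2 (fun k => |(PySem.List.pyGet? st.2.1 (k - 1)).getD 0 - mid|) with
    | some best => adjustA tokens n best
    | none =>
      let mid_tok : Int := PySem.Int.floordiv n 2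
      match (PySem.List.pyRange mid_tok 0 (-1)).find?
          (fun i => lastIsEnderTxt (pyDictGetText ((PySem.List.pyGet? tokens (i - 1)).getD []))) with
      | some i => adjustA tokens n i
      | none =>
        match (PySem.List.pyRange (mid_tok + 1) n 1).find?
            (fun i => lastIsEnderTxt (pyDictGetText ((PySem.List.pyGet? tokens (i - 1)).getD []))) with
        | some i => adjustA tokens n i
        | none => adjustA tokens n mid_tok

-- ===== PORT B =====
-- B's unified boundary predicate (_boundary_ok in Source B)
def boundaryOk (left right : String) : Bool :=
  PySem.Str.startswith right " " ||
    (PySem.Str.endswith left " " || (left != "" && lastEnderOrMinor left))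

-- B's _is_safe_at over the pre-extracted texts list
def isSafeB (texts : List String) (n k : Int) : Bool :=
  if k ≤ 0 || n ≤ k then true
  else
    boundaryOk ((PySem.List.pyGet? texts (k - 1)).getD "")
      ((PySem.List.pyGet? texts k).getD "")

def adjustB (texts : List String) (n k : Int) : Int :=
  if isSafeB texts n k then k
  else
    match (PySem.List.pyRange (k + 1) n 1).find? (fun j => isSafeB texts n j) with
    | some j => j
    | none =>
      match (PySem.List.pyRange (k - 1) 0 (-1)).find? (fun j => isSafeB texts n j) with
      | some j => j
      | none => k

def find_split_index_py_alt (tokens : List (List (String × String))) : Int :=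
  let n : Int := tokens.length
  if tokens.length ≤ 1 then 1
  else
    let texts := tokens.map pyDictGetText
    let cum := (texts.foldl (fun (st : Int × List Int) s =>
        (st.1 + (s.length : Int), st.2 ++ [st.1 + (s.length : Int)])) (0, [])).2
    let mid := PySem.Int.floordiv ((PySem.List.pyGet? cum (-1)).getD 0) 2
    let cands := (PySem.List.pyRange 1 n 1).filterMap (fun k =>
        if boundaryOk ((PySem.List.pyGet? texts (k - 1)).getD "")
            ((PySem.List.pyGet? texts k).getD "")
          then some (k, (PySem.List.pyGet? cum (k - 1)).getD 0) else none)
    match cands with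
    | kc0 :: _ =>
      -- cum is nondecreasing: the candidate closest to mid is the earliest one attaining
      -- the largest count ≤ mid, or the first one beyond mid; ties go to the left one
      let lefts := cands.filter (fun kc => decide (kc.2 ≤ mid))
      let best :=
        if lefts.isEmpty then kc0.1
        else
          let cmax := ((PySem.List.pyGet? lefts (-1)).getD (0, 0)).2
          let p := (lefts.find? (fun kc => kc.2 == cmax)).getD kc0
          match cands.find? (fun kc => decide (mid < kc.2)) with
          | none => p.1
          | some q => if mid - p.2 ≤ q.2 - mid then p.1 else q.1
      adjustB texts n best
    | [] =>
      let mid_tok : Int := PySem.Int.floordiv n 2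
      match (PySem.List.pyRange mid_tok 0 (-1)).find?
          (fun i => lastIsEnderTxt ((PySem.List.pyGet? texts (i - 1)).getD "")) with
      | some i => adjustB texts n i
      | none =>
        match (PySem.List.pyRange (mid_tok + 1) n 1).find?
            (fun i => lastIsEnderTxt ((PySem.List.pyGet? texts (i - 1)).getD "")) with
        | some i => adjustB texts n i
        | none => adjustB texts n mid_tok

-- ===== PRECONDITION & SPEC =====
def Spec_find_split_index_py (tokens : List (List (String × String))) (out : Int) : Prop := out = find_split_index_py_alt tokens
instance (tokens : List (List (String × String))) (out : Int) : Decidable (Spec_find_split_index_py tokens out) := by unfold Spec_find_split_index_py; infer_instance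

-- ===== CLAIM (what is proved, stated in full; the proofs are below) =====
def Claim_equal_find_split_index_py : Prop := ∀ (tokens : List (List (String × String))), Dom_find_split_index_py tokens → Spec_find_split_index_py tokens (find_split_index_py tokens)

-- ===== LEMMAS AND PROOFS =====

theorem pyGet?_map_getText (tokens : List (List (String × String))) (i : Int) :
    (PySem.List.pyGet? (tokens.map pyDictGetText) i).getD "" =
      pyDictGetText ((PySem.List.pyGet? tokens i).getD []) := by
  simp only [PySem.List.pyGet?, List.length_map]
  cases PySem.List.pyIdx? tokens.length i with
  | none => simp [pyDictGetText]
  | some k =>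
    simp only [Option.bind_some, List.getElem?_map]
    cases tokens[k]? with
    | none => simp [pyDictGetText]
    | some t => simp

theorem isSafeA_eq (tokens : List (List (String × String))) (n k : Int) :
    isSafeA tokens n k = isSafeB (tokens.map pyDictGetText) n k := by
  simp [isSafeA, isSafeB, boundaryOk, pyGet?_map_getText]

theorem adjustA_eq (tokens : List (List (String × String))) (n k : Int) :
    adjustA tokens n k = adjustB (tokens.map pyDictGetText) n k := by
  simp [adjustA, adjustB, isSafeA_eq]

-- prefix sums of the text lengths (proof-side only)
def preLen (texts : List String) (m : Nat) : Int :=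
  ((texts.take m).map (fun s => (s.length : Int))).sum

theorem preLen_succ (texts : List String) (m : Nat) (h : m < texts.length) :
    preLen texts (m + 1) =
      preLen texts m + (((PySem.List.pyGet? texts (m : Int)).getD "").length : Int) := by
  unfold preLen
  rw [List.take_add_one, List.map_append, List.sum_append, PySem.List.pyGet?_natCast,
    List.getElem?_eq_getElem h]
  simp

theorem preLen_le_succ (texts : List String) (m : Nat) :
    preLen texts m ≤ preLen texts (m + 1) := by
  unfold preLen
  rw [List.take_add_one, List.map_append, List.sum_append]
  have : 0 ≤ ((texts[m]?.toList).map (fun s => ((s.length : Nat) : Int))).sum := by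
    cases texts[m]? <;> simp
  omega

theorem preLen_mono (texts : List String) (a b : Nat) (h : a ≤ b) :
    preLen texts a ≤ preLen texts b := by
  induction b with
  | zero => have : a = 0 := by omega
            simp [this]
  | succ b ih =>
    rcases Nat.lt_or_ge a (b+1) with hlt | hge
    · exact le_trans (ih (by omega)) (preLen_le_succ texts b)
    · have : a = b + 1 := by omega
      simp [this]

theorem preLen_all (texts : List String) :
    preLen texts texts.length = (texts.map (fun s => (s.length : Int))).sum := by
  simp [preLen]

theorem foldl_add_len (l : List (List (String × String))) (a : Int) :
    l.foldl (fun s t => s + ((pyDictGetText t).length : Int)) a =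
      a + ((l.map pyDictGetText).map (fun s => (s.length : Int))).sum := by
  induction l generalizing a with
  | nil => simp
  | cons h t ih => simp [ih, add_assoc]

theorem condA_eq_boundaryOk (l r : String) : condA l r = boundaryOk l r := by
  by_cases hl : l = ""
  · subst hl
    have h0 : PySem.Str.endswith "" " " = false := by decide
    unfold condA boundaryOk
    rw [h0]
    simp
  · have hne : (l != "") = true := by simpa using hl
    unfold condA boundaryOk
    rw [hne]
    cases PySem.Str.endswith l " " <;> cases lastEnderOrMinor l <;> simp

theorem isSafeB_interior (texts : List String) (n : Int) (i : Nat) (h : (i : Int) + 1 < n) :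
    isSafeB texts n ((i : Int) + 1) =
      boundaryOk ((PySem.List.pyGet? texts (i : Int)).getD "")
        ((PySem.List.pyGet? texts ((i : Int) + 1)).getD "") := by
  unfold isSafeB
  rw [if_neg (by simp; omega)]
  simp only [add_sub_cancel_right]

theorem filterMap_singleton {β : Type} (f : Nat → Option β) (m : Nat) :
    List.filterMap f [m] = (f m).toList := by
  cases h : f m <;> simp [h]

theorem filterMap_range_succ {β : Type} (f : Nat → Option β) (m : Nat) :
    (List.range (m + 1)).filterMap f = (List.range m).filterMap f ++ (f m).toList := by
  rw [List.range_succ, List.filterMap_append]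
  cases h : f m <;> simp [h]

-- closed form of A's enumerate loop
theorem aloop_eq (texts : List String) (n : Int) (m : Nat) (hm : m ≤ texts.length) :
    (List.range m).foldl
      (fun (st : Int × List Int × List Int) (i : Nat) =>
        (st.1 + (((PySem.List.pyGet? texts (i : Int)).getD "").length : Int),
         st.2.1 ++ [st.1 + (((PySem.List.pyGet? texts (i : Int)).getD "").length : Int)],
         if (i : Int) < n - 1 then
           (if condA ((PySem.List.pyGet? texts (i : Int)).getD "")
                ((PySem.List.pyGet? texts ((i : Int) + 1)).getD "")
             then st.2.2 ++ [(i : Int) + 1] else st.2.2)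
         else st.2.2))
      (0, [], []) =
    (preLen texts m,
     (List.range m).map (fun (i : Nat) => preLen texts (i + 1)),
     (List.range m).filterMap (fun (i : Nat) =>
        if (i : Int) < n - 1 then
          (if condA ((PySem.List.pyGet? texts (i : Int)).getD "")
                ((PySem.List.pyGet? texts ((i : Int) + 1)).getD "")
            then some ((i : Int) + 1) else none)
        else none)) := by
  induction m with
  | zero => simp [preLen]
  | succ m ih =>
    have hm' : m ≤ texts.length := Nat.le_of_succ_le hm
    have hlt : m < texts.length := hm
    rw [List.range_succ, List.foldl_append, ih hm', List.foldl_cons, List.foldl_nil]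
    refine Prod.ext ?_ (Prod.ext ?_ ?_)
    · dsimp only
      rw [preLen_succ texts m hlt]
    · dsimp only
      simp only [List.map_append, List.map_cons, List.map_nil, preLen_succ texts m hlt]
    · dsimp only
      rw [List.filterMap_append, filterMap_singleton]
      try dsimp only
      generalize hA : (PySem.List.pyGet? texts ((m : Nat) : Int)).getD "" = a
      generalize hB : (PySem.List.pyGet? texts (((m : Nat) : Int) + 1)).getD "" = b
      split_ifs with hb hc <;> simp

-- generic: a guarded filterMap is a filter followed by a map
theorem filterMap_if_eq_filter_map {β : Type} (l : List Nat) (p : Nat → Bool) (g : Nat → β) :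
    l.filterMap (fun i => if p i then some (g i) else none) = (l.filter p).map g := by
  induction l with
  | nil => rfl
  | cons x xs ih =>
    by_cases hx : p x <;> simp [List.filterMap_cons, List.filter_cons, hx, ih]

-- A's candidate list as filter-then-map over token indices
theorem safeL_eq (texts : List String) (N : Nat) (h2 : 2 ≤ N) :
    (List.range N).filterMap (fun (i : Nat) =>
        if (i : Int) < (N : Int) - 1 then
          (if condA ((PySem.List.pyGet? texts (i : Int)).getD "")
                ((PySem.List.pyGet? texts ((i : Int) + 1)).getD "")
            then some ((i : Int) + 1) else none)
        else none)
      = ((List.range (N - 1)).filter (fun (i : Nat) => isSafeB texts (N : Int) ((i : Int) + 1))).map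
          (fun (i : Nat) => ((i : Int) + 1)) := by
  obtain ⟨M, rfl⟩ : ∃ M, N = M + 1 := ⟨N - 1, by omega⟩
  rw [filterMap_range_succ]
  rw [if_neg (by push_cast; omega)]
  simp only [Option.toList_none, List.append_nil, Nat.add_sub_cancel]
  rw [← filterMap_if_eq_filter_map]
  refine List.filterMap_congr (fun i hi => ?_)
  have hiM : i < M := List.mem_range.mp hi
  rw [isSafeB_interior texts _ i (by push_cast; omega)]
  rw [if_pos (by push_cast; omega), condA_eq_boundaryOk]

-- closed form of B's cumulative-sum loop
theorem cum_spec (texts : List String) (a : Int) (l : List Int) :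
    texts.foldl (fun (st : Int × List Int) s =>
        (st.1 + (s.length : Int), st.2 ++ [st.1 + (s.length : Int)])) (a, l) =
      (a + preLen texts texts.length,
       l ++ (List.range texts.length).map (fun i => a + preLen texts (i + 1))) := by
  induction texts generalizing a l with
  | nil => simp [preLen]
  | cons s ts ih =>
    have hpre : ∀ m, preLen (s :: ts) (m + 1) = (s.length : Int) + preLen ts m := by
      intro m; simp [preLen, List.take_succ_cons]
    rw [List.foldl_cons]
    dsimp only
    rw [ih]
    simp only [List.length_cons]
    refine Prod.ext ?_ ?_
    · dsimp only
      rw [hpre ts.length]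
      ring
    · dsimp only
      have hhead : a + preLen (s :: ts) (0 + 1) = a + (s.length : Int) := by
        rw [hpre 0]
        simp [preLen]
      have htail : List.map ((fun i => a + preLen (s :: ts) (i + 1)) ∘ Nat.succ)
            (List.range ts.length) =
          List.map (fun i => a + (s.length : Int) + preLen ts (i + 1)) (List.range ts.length) := by
        refine List.map_congr_left (fun i _ => ?_)
        simp only [Function.comp_apply, Nat.succ_eq_add_one, hpre (i + 1)]
        ring
      rw [List.range_succ_eq_map, List.map_cons, List.map_map, hhead, htail,
        List.append_assoc, List.singleton_append]

-- first-minimum machinery (proof-side only): combine preferring the left on ties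
def cmb {α : Type} (f : α → Int) : Option α → Option α → Option α
  | none, r => r
  | some p, none => some p
  | some p, some q => if f p ≤ f q then some p else some q

def fmin {α : Type} (f : α → Int) : List α → Option α
  | [] => none
  | x :: xs => cmb f (some x) (fmin f xs)

theorem cmb_assoc {α : Type} (f : α → Int) (a b c : Option α) :
    cmb f (cmb f a b) c = cmb f a (cmb f b c) := by
  cases a <;> cases b <;> cases c <;> simp only [cmb] <;> (try rfl) <;>
    split_ifs <;> simp only [cmb] <;> (try rfl) <;> split_ifs <;>
    first | rfl | omega

def mstep (f : Int → Int) (acc : Option Int) (x : Int) : Option Int :=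
  match acc with
  | none => some x
  | some m => if f x < f m then some x else some m

theorem min?_eq_foldl_mstep (l : List Int) (key : Int → Int) :
    PySem.List.min? l key = l.foldl (mstep key) none := by
  unfold PySem.List.min?
  congr 1
  funext acc x
  cases acc <;> rfl

theorem foldl_mstep_cmb (f : Int → Int) (l : List Int) (acc : Option Int) :
    l.foldl (mstep f) acc = cmb f acc (fmin f l) := by
  induction l generalizing acc with
  | nil => cases acc <;> rfl
  | cons x xs ih =>
    rw [List.foldl_cons, ih]
    have hstep : mstep f acc x = cmb f acc (some x) := by
      cases acc with
      | none => rfl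
      | some m =>
        simp only [mstep, cmb]
        by_cases h : f m ≤ f x
        · rw [if_neg (by omega), if_pos h]
        · rw [if_pos (by omega), if_neg h]
    rw [hstep, cmb_assoc]
    rfl

theorem min?_eq_fmin (l : List Int) (key : Int → Int) :
    PySem.List.min? l key = fmin key l := by
  rw [min?_eq_foldl_mstep, foldl_mstep_cmb]
  rfl

theorem fmin_append {α : Type} (f : α → Int) (L R : List α) :
    fmin f (L ++ R) = cmb f (fmin f L) (fmin f R) := by
  induction L with
  | nil => rfl
  | cons x t ih => simp only [List.cons_append, fmin, ih, cmb_assoc]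

theorem fmin_mem {α : Type} (f : α → Int) (l : List α) (m : α) (h : fmin f l = some m) :
    m ∈ l := by
  induction l with
  | nil => cases h
  | cons x xs ih =>
    simp only [fmin] at h
    cases hx : fmin f xs with
    | none => rw [hx] at h; simp only [cmb] at h; injection h with e; subst e; exact List.mem_cons_self ..
    | some m' =>
      rw [hx] at h
      simp only [cmb] at h
      split_ifs at h <;> injection h with e <;> subst e
      · exact List.mem_cons_self ..
      · exact List.mem_cons_of_mem _ (ih hx)

theorem fmin_head {α : Type} (f : α → Int) (x : α) (xs : List α)
    (h : ∀ y ∈ xs, f x ≤ f y) : fmin f (x :: xs) = some x := by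
  simp only [fmin]
  cases hx : fmin f xs with
  | none => rfl
  | some m => simp only [cmb, if_pos (h m (fmin_mem f xs m hx))]

theorem fmin_eq_none {α : Type} (f : α → Int) (l : List α) :
    fmin f l = none ↔ l = [] := by
  cases l with
  | nil => simp [fmin]
  | cons x xs =>
    simp only [fmin]
    cases fmin f xs <;> simp [cmb] <;> split_ifs <;> simp

theorem fmin_map {α β : Type} (g : α → β) (f : β → Int) (l : List α) :
    fmin f (l.map g) = (fmin (fun a => f (g a)) l).map g := by
  induction l with
  | nil => rfl
  | cons x xs ih =>
    simp only [List.map_cons, fmin, ih]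
    cases fmin (fun a => f (g a)) xs <;> simp [cmb] <;> split_ifs <;> simp

theorem fmin_congr_mem {α : Type} (f g : α → Int) (l : List α)
    (h : ∀ x ∈ l, f x = g x) : fmin f l = fmin g l := by
  induction l with
  | nil => rfl
  | cons x xs ih =>
    simp only [fmin]
    rw [ih (fun y hy => h y (List.mem_cons_of_mem _ hy))]
    cases hx : fmin g xs with
    | none => rfl
    | some m =>
      simp only [cmb, h x (List.mem_cons_self ..), h m (List.mem_cons_of_mem _ (fmin_mem g xs m hx))]

-- with a monotone second component, filtering ≤ mid is a takeWhile
theorem filter_mono_eq_takeWhile (mid : Int) (l : List (Int × Int))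
    (h : l.Pairwise (fun a b => a.2 ≤ b.2)) :
    l.filter (fun kc => decide (kc.2 ≤ mid)) = l.takeWhile (fun kc => decide (kc.2 ≤ mid)) := by
  induction l with
  | nil => rfl
  | cons x xs ih =>
    rw [List.pairwise_cons] at h
    by_cases hx : x.2 ≤ mid
    · rw [List.filter_cons_of_pos (by simpa using hx),
        List.takeWhile_cons_of_pos (by simpa using hx), ih h.2]
    · rw [List.filter_cons_of_neg (by simpa using hx),
        List.takeWhile_cons_of_neg (by simpa using hx)]
      refine List.filter_eq_nil_iff.mpr (fun y hy => ?_)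
      have := h.1 y hy
      simp only [decide_eq_true_eq]
      omega

theorem find?_gt_eq_head_dropWhile (mid : Int) (l : List (Int × Int)) :
    l.find? (fun kc => decide (mid < kc.2)) =
      (l.dropWhile (fun kc => decide (kc.2 ≤ mid))).head? := by
  induction l with
  | nil => rfl
  | cons x xs ih =>
    by_cases hx : x.2 ≤ mid
    · rw [List.find?_cons_of_neg (by simp only [decide_eq_true_eq]; omega),
        List.dropWhile_cons_of_pos (by simpa using hx), ih]
    · rw [List.find?_cons_of_pos (by simp only [decide_eq_true_eq]; omega),
        List.dropWhile_cons_of_neg (by simpa using hx)]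
      rfl

-- first minimum of an antitone-valued monotone list: earliest occurrence of the last value
theorem fmin_left (mid : Int) (L : List (Int × Int)) (hL : L ≠ [])
    (hmono : L.Pairwise (fun a b => a.2 ≤ b.2)) (hle : ∀ kc ∈ L, kc.2 ≤ mid) :
    fmin (fun kc => |kc.2 - mid|) L =
      L.find? (fun kc => kc.2 == (L.getLast hL).2) := by
  induction L with
  | nil => cases hL rfl
  | cons x xs ih =>
    cases xs with
    | nil =>
      simp only [fmin, cmb, List.getLast_singleton]
      rw [List.find?_cons_of_pos (by simp)]
    | cons y ys =>
      rw [List.pairwise_cons] at hmono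
      have hxs : (y :: ys) ≠ [] := by simp
      have hg : (x :: y :: ys).getLast hL = (y :: ys).getLast hxs := List.getLast_cons hxs
      set g := (y :: ys).getLast hxs with hgdef
      have hIH := ih hxs hmono.2 (fun kc hkc => hle kc (List.mem_cons_of_mem _ hkc))
      have hgm : g ∈ (y :: ys) := List.getLast_mem hxs
      have hfind : ((y :: ys).find? (fun kc => kc.2 == g.2)).isSome := by
        rw [List.find?_isSome]
        exact ⟨g, hgm, by simp⟩
      obtain ⟨m, hm⟩ := Option.isSome_iff_exists.mp hfind
      have hmmem : m ∈ (y :: ys) := List.mem_of_find?_eq_some hm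
      have hmg : m.2 = g.2 := by simpa using List.find?_some hm
      have hxg : x.2 ≤ g.2 := hmono.1 g hgm
      have hxmid : x.2 ≤ mid := hle x (List.mem_cons_self ..)
      have hgmid : g.2 ≤ mid := hle g (List.mem_cons_of_mem _ hgm)
      simp only [fmin] at *
      rw [hIH, hm]
      simp only [cmb]
      rw [hg]
      by_cases hxeq : x.2 = g.2
      · rw [if_pos (by rw [abs_of_nonpos (by omega), abs_of_nonpos (by omega)]; omega)]
        rw [List.find?_cons_of_pos (by simpa using hxeq)]
      · rw [if_neg (by rw [abs_of_nonpos (by omega), abs_of_nonpos (by omega)]; omega)]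
        rw [List.find?_cons_of_neg (by simpa using hxeq), hm]

theorem cumGet (texts : List String) (N i : Nat) (hi : i < N) :
    (PySem.List.pyGet? ((List.range N).map (fun j => preLen texts (j + 1))) (i : Int)).getD 0 =
      preLen texts (i + 1) := by
  rw [PySem.List.pyGet?_natCast, List.getElem?_map, List.getElem?_range hi]
  rfl

-- the two-sided selection computes the first minimum of |cum - mid| over the candidates
theorem sel_eq (mid : Int) (kc0 : Int × Int) (rest : List (Int × Int))
    (hmono : (kc0 :: rest).Pairwise (fun a b => a.2 ≤ b.2)) :
    (fmin (fun kc => |kc.2 - mid|) (kc0 :: rest)).map Prod.fst =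
      some (
        if ((kc0 :: rest).filter (fun kc => decide (kc.2 ≤ mid))).isEmpty then kc0.1
        else
          let lefts := (kc0 :: rest).filter (fun kc => decide (kc.2 ≤ mid))
          let cmax := ((PySem.List.pyGet? lefts (-1)).getD (0, 0)).2
          let p := (lefts.find? (fun kc => kc.2 == cmax)).getD kc0
          match (kc0 :: rest).find? (fun kc => decide (mid < kc.2)) with
          | none => p.1
          | some q => if mid - p.2 ≤ q.2 - mid then p.1 else q.1) := by
  set cands := kc0 :: rest with hcands
  by_cases hL : (cands.filter (fun kc => decide (kc.2 ≤ mid))).isEmpty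
  · -- every candidate is beyond mid: the head is closest
    rw [if_pos hL]
    have hall : ∀ kc ∈ cands, mid < kc.2 := by
      intro kc hkc
      by_contra hc
      have : kc ∈ cands.filter (fun kc => decide (kc.2 ≤ mid)) :=
        List.mem_filter.mpr ⟨hkc, by simpa using by omega⟩
      rw [List.isEmpty_iff.mp hL] at this
      cases this
    rw [List.pairwise_cons] at hmono
    have h0 : mid < kc0.2 := hall kc0 (List.mem_cons_self ..)
    rw [fmin_head _ _ _ (fun y hy => by
      have h1 : kc0.2 ≤ y.2 := hmono.1 y hy
      have h2 : mid < y.2 := hall y (List.mem_cons_of_mem _ hy)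
      rw [abs_of_nonneg (by omega), abs_of_nonneg (by omega)]
      omega)]
    rfl
  · rw [if_neg hL]
    set L := cands.filter (fun kc => decide (kc.2 ≤ mid)) with hLdef
    have hLne : L ≠ [] := by simpa [List.isEmpty_iff] using hL
    have hLtake : L = cands.takeWhile (fun kc => decide (kc.2 ≤ mid)) :=
      filter_mono_eq_takeWhile mid cands hmono
    have hsplit : cands = L ++ cands.dropWhile (fun kc => decide (kc.2 ≤ mid)) := by
      rw [hLtake, List.takeWhile_append_dropWhile]
    have hLmono : L.Pairwise (fun a b => a.2 ≤ b.2) := hmono.filter _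
    have hLle : ∀ kc ∈ L, kc.2 ≤ mid := by
      intro kc hkc
      have := (List.mem_filter.mp (hLdef ▸ hkc)).2
      simpa using this
    -- the earliest candidate attaining the largest count ≤ mid
    have hcmax : ((PySem.List.pyGet? L (-1)).getD (0, 0)).2 = (L.getLast hLne).2 := by
      rw [PySem.List.pyGet?_neg_one, List.getLast?_eq_getLast ..]
      rfl
    have hfind : (L.find? (fun kc => kc.2 == (L.getLast hLne).2)).isSome := by
      rw [List.find?_isSome]
      exact ⟨L.getLast hLne, List.getLast_mem hLne, by simp⟩
    obtain ⟨p, hp⟩ := Option.isSome_iff_exists.mp hfind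
    have hpmem : p ∈ L := List.mem_of_find?_eq_some hp
    have hpmid : p.2 ≤ mid := hLle p hpmem
    have hfminL : fmin (fun kc => |kc.2 - mid|) L = some p := by
      rw [fmin_left mid L hLne hLmono hLle, hp]
    have hfindq : cands.find? (fun kc => decide (mid < kc.2)) =
        (cands.dropWhile (fun kc => decide (kc.2 ≤ mid))).head? :=
      find?_gt_eq_head_dropWhile mid cands
    dsimp only
    rw [hcmax, hp]
    simp only [Option.getD_some]
    cases hR : cands.dropWhile (fun kc => decide (kc.2 ≤ mid)) with
    | nil =>
      rw [hfindq, hR]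
      have hcL : cands = L := by rw [hsplit, hR, List.append_nil]
      rw [hcL, hfminL]
      rfl
    | cons q R' =>
      rw [hfindq, hR, List.head?_cons]
      have hq : mid < q.2 := by
        have hfq : cands.find? (fun kc => decide (mid < kc.2)) = some q := by
          rw [hfindq, hR, List.head?_cons]
        simpa using List.find?_some hfq
      have hpairLR : (L ++ q :: R').Pairwise (fun a b => a.2 ≤ b.2) := by
        rw [← hR, ← hsplit]
        exact hmono
      have hRmono : (q :: R').Pairwise (fun a b => a.2 ≤ b.2) :=
        (List.pairwise_append.mp hpairLR).2.1
      have hfminR : fmin (fun kc => |kc.2 - mid|) (q :: R') = some q := by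
        refine fmin_head _ _ _ (fun y hy => ?_)
        have h1 : q.2 ≤ y.2 := (List.pairwise_cons.mp hRmono).1 y hy
        have haq : |q.2 - mid| = q.2 - mid := abs_of_nonneg (by omega)
        have hay : |y.2 - mid| = y.2 - mid := abs_of_nonneg (by omega)
        rw [haq, hay]
        omega
      conv_lhs => rw [hsplit, hR]
      rw [fmin_append, hfminL, hfminR]
      have hap : |p.2 - mid| = mid - p.2 := by
        rw [abs_of_nonpos (by omega)]
        ring
      have haq : |q.2 - mid| = q.2 - mid := abs_of_nonneg (by omega)
      simp only [cmb, hap, haq]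
      by_cases hcond : mid - p.2 ≤ q.2 - mid
      · rw [if_pos hcond, if_pos hcond]
        rfl
      · rw [if_neg hcond, if_neg hcond]
        rfl

-- ===== VERDICT (by name: the statement is the Claim_ definition above) =====
theorem find_split_index_py_spec : Claim_equal_find_split_index_py := by
  intro tokens _
  unfold Spec_find_split_index_py
  by_cases h1 : tokens.length ≤ 1
  · simp [find_split_index_py, find_split_index_py_alt, h1]
  · have h2 : 2 ≤ tokens.length := by omega
    simp only [find_split_index_py, find_split_index_py_alt, if_neg h1]
    simp only [← pyGet?_map_getText]
    rw [foldl_add_len, zero_add]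
    rw [aloop_eq (tokens.map pyDictGetText) ((tokens.length : Int)) tokens.length (by simp)]
    dsimp only
    rw [safeL_eq (tokens.map pyDictGetText) tokens.length h2]
    set texts := tokens.map pyDictGetText with htexts
    have hlen : texts.length = tokens.length := by
      rw [htexts, List.length_map]
    -- B's cumulative list
    rw [cum_spec texts 0 []]
    simp only [List.nil_append, zero_add, hlen]
    -- B's midpoint equals A's midpoint
    have hcumlast : (PySem.List.pyGet?
        ((List.range tokens.length).map (fun i => preLen texts (i + 1))) (-1)).getD 0 =
        preLen texts tokens.length := by
      rw [PySem.List.pyGet?_neg_one]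
      have hne : ((List.range tokens.length).map (fun i => preLen texts (i + 1))) ≠ [] := by
        simp only [ne_eq, List.map_eq_nil_iff, List.range_eq_nil]
        omega
      rw [List.getLast?_eq_getLast hne]
      rw [List.getLast_eq_getElem]
      simp only [List.length_map, List.length_range]
      rw [List.getElem_map, List.getElem_range]
      simp only [Option.getD_some]
      congr 1
      omega
    have hsum : preLen texts tokens.length = (texts.map (fun s => (s.length : Int))).sum := by
      rw [← hlen, preLen_all]
    rw [hcumlast, hsum]
    set mid := PySem.Int.floordiv ((texts.map (fun s => (s.length : Int))).sum) 2 with hmid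
    -- B's candidate list
    have hcands : (PySem.List.pyRange 1 ((tokens.length : Nat) : Int) 1).filterMap (fun k =>
        if boundaryOk ((PySem.List.pyGet? texts (k - 1)).getD "")
            ((PySem.List.pyGet? texts k).getD "")
          then some (k, (PySem.List.pyGet?
            ((List.range tokens.length).map (fun i => preLen texts (i + 1))) (k - 1)).getD 0)
          else none) =
        ((List.range (tokens.length - 1)).filter
            (fun (i : Nat) => isSafeB texts ((tokens.length : Nat) : Int) ((i : Int) + 1))).map
          (fun (i : Nat) => ((i : Int) + 1, preLen texts (i + 1))) := by
      rw [PySem.List.pyRange_one]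
      have ht : (((tokens.length : Nat) : Int) - 1).toNat = tokens.length - 1 := by omega
      rw [ht, List.filterMap_map]
      rw [← filterMap_if_eq_filter_map (List.range (tokens.length - 1))
        (fun (i : Nat) => isSafeB texts ((tokens.length : Nat) : Int) ((i : Int) + 1))
        (fun (i : Nat) => ((i : Int) + 1, preLen texts (i + 1)))]
      refine List.filterMap_congr (fun i hi => ?_)
      have hiN : i < tokens.length - 1 := List.mem_range.mp hi
      simp only [Function.comp_apply]
      have e1 : (1 : Int) + (i : Nat) - 1 = ((i : Nat) : Int) := by ring
      have e2 : (1 : Int) + (i : Nat) = (((i : Nat) : Int) + 1) := by ring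
      rw [e1, e2]
      rw [isSafeB_interior texts _ i (by push_cast; omega)]
      rw [cumGet texts tokens.length i (by omega)]
    rw [hcands]
    -- A's key over the safe list in terms of prefix sums
    have hAkey : PySem.List.min?
        (((List.range (tokens.length - 1)).filter
            (fun (i : Nat) => isSafeB texts ((tokens.length : Nat) : Int) ((i : Int) + 1))).map
          (fun (i : Nat) => ((i : Int) + 1)))
        (fun k => |(PySem.List.pyGet?
            ((List.range tokens.length).map (fun i => preLen texts (i + 1))) (k - 1)).getD 0 - mid|) =
        (fmin (fun (i : Nat) => |preLen texts (i + 1) - mid|)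
          ((List.range (tokens.length - 1)).filter
            (fun (i : Nat) => isSafeB texts ((tokens.length : Nat) : Int) ((i : Int) + 1)))).map
          (fun (i : Nat) => ((i : Int) + 1)) := by
      rw [min?_eq_fmin, fmin_map]
      congr 1
      refine fmin_congr_mem _ _ _ (fun i hi => ?_)
      have hiN : i < tokens.length - 1 := List.mem_range.mp (List.mem_filter.mp hi).1
      show |(PySem.List.pyGet?
          ((List.range tokens.length).map (fun i => preLen texts (i + 1)))
          ((i : Int) + 1 - 1)).getD 0 - mid| = |preLen texts (i + 1) - mid|
      rw [add_sub_cancel_right, cumGet texts tokens.length i (by omega)]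
    rw [hAkey]
    -- case on whether any safe boundary exists
    cases hFc : (List.range (tokens.length - 1)).filter
        (fun (i : Nat) => isSafeB texts ((tokens.length : Nat) : Int) ((i : Int) + 1)) with
    | nil =>
      simp only [fmin, Option.map_none, List.map_nil, adjustA_eq, htexts]
    | cons f0 F' =>
      obtain ⟨m, hm⟩ : ∃ m, fmin (fun (i : Nat) => |preLen texts (i + 1) - mid|) (f0 :: F') = some m := by
        cases hx : fmin (fun (i : Nat) => |preLen texts (i + 1) - mid|) (f0 :: F') with
        | none => exact absurd ((fmin_eq_none _ _).mp hx) (by simp)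
        | some m => exact ⟨m, rfl⟩
      rw [hm]
      simp only [Option.map_some, List.map_cons]
      -- the candidates' counts are monotone
      have hpF : (f0 :: F').Pairwise (fun a b => a < b) := by
        rw [← hFc]
        exact List.pairwise_lt_range.filter _
      have hmono' : (((f0 :: F').map
          (fun (i : Nat) => ((i : Int) + 1, preLen texts (i + 1)))) :
            List (Int × Int)).Pairwise (fun a b => a.2 ≤ b.2) := by
        rw [List.pairwise_map]
        exact hpF.imp (fun hab => preLen_mono texts _ _ (by omega))
      have hsel := sel_eq mid ((f0 : Nat) |> (fun (i : Nat) => ((i : Int) + 1, preLen texts (i + 1))))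
        (F'.map (fun (i : Nat) => ((i : Int) + 1, preLen texts (i + 1))))
        (by simpa using hmono')
      rw [show ((fun (i : Nat) => ((i : Int) + 1, preLen texts (i + 1))) f0 ::
          F'.map (fun (i : Nat) => ((i : Int) + 1, preLen texts (i + 1)))) =
          (f0 :: F').map (fun (i : Nat) => ((i : Int) + 1, preLen texts (i + 1))) from rfl] at hsel
      rw [fmin_map] at hsel
      dsimp only at hsel
      rw [hm] at hsel
      simp only [Option.map_some] at hsel
      have hbody := Option.some.inj hsel
      rw [adjustA_eq, ← htexts, hbody]
      simp only [List.map_cons]
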